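-- pv_equiv track=rewrite | github.com/ikramarenko1/pythonMainAcademy | lesson_7/homework9.py | new_dict_without_identical_keys
-- ===== SOURCE A (Python) =====
-- def new_dict_without_identical_keys(dictionary1, dictionary2):
--     temp = []
--     for key in dictionary1:
--         if key in dictionary2 and dictionary1[key] == dictionary2[key]:
--             temp.append(key)
--
--     for key in temp:
--         del dictionary1[key]
--
--     return dictionary1
-- ===== SOURCE B (Python) =====
-- def new_dict_without_identical_keys(dictionary1, dictionary2):
--     return {k: v for k, v in dictionary1.items() if dictionary2.get(k) != v}
-- ===== Notes on version B (the rewrite author's own statement) =====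
-- stated objective: simpler
-- what changed: A builds a temp list of matching keys and then deletes them from dictionary1 in a second mutating pass; B is a single dict comprehension that builds the result directly, keeping each (k, v) of dictionary1 unless dictionary2.get(k) == v (A mutates dictionary1 in place, B leaves it untouched; the return value is identical).
import Mathlib
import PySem

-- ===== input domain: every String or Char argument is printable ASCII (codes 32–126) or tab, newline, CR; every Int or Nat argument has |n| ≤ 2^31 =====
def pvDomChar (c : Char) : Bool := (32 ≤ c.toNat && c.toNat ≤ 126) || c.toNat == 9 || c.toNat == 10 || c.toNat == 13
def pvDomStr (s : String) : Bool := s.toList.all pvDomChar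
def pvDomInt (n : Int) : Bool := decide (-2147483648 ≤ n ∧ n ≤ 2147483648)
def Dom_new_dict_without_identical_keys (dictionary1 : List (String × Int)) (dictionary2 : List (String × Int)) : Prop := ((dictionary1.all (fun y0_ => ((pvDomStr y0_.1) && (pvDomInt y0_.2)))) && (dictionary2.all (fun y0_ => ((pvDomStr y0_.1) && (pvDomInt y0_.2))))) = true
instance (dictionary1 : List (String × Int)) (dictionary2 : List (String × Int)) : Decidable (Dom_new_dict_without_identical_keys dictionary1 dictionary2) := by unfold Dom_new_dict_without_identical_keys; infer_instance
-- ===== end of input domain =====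

-- B replaces A's two mutating passes (collect matching keys, then delete them from dictionary1)
-- with a single dict comprehension building the result; A mutates dictionary1 in place, B does not —
-- the equivalence proved here is about the RETURN value only.


-- ===== PORT A =====
-- for key in dictionary1: if key in dictionary2 and dictionary1[key] == dictionary2[key]: temp.append(key)
-- then: for key in temp: del dictionary1[key]; return dictionary1
def new_dict_without_identical_keys (dictionary1 : List (String × Int)) (dictionary2 : List (String × Int)) : List (String × Int) :=
  let temp : List String := dictionary1.foldl
    (fun t p =>
      if (PySem.Dict.mk dictionary2).contains p.1
          && ((PySem.Dict.mk dictionary1).get? p.1 == (PySem.Dict.mk dictionary2).get? p.1)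
      then t ++ [p.1] else t) []
  (temp.foldl (fun d k => d.erase k) (PySem.Dict.mk dictionary1)).items

-- ===== PORT B =====
-- {k: v for k, v in dictionary1.items() if dictionary2.get(k) != v}
def new_dict_without_identical_keys_alt (dictionary1 : List (String × Int)) (dictionary2 : List (String × Int)) : List (String × Int) :=
  dictionary1.filter (fun p => !((PySem.Dict.mk dictionary2).get? p.1 == some p.2))

-- ===== PRECONDITION & SPEC =====
-- Pre_ : the association lists encode Python dicts, whose keys are unique; it excludes only
-- duplicate-key lists, which correspond to no Python input of A.
def Pre_new_dict_without_identical_keys (dictionary1 : List (String × Int)) (dictionary2 : List (String × Int)) : Prop :=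
  (dictionary1.map Prod.fst).Nodup
instance (dictionary1 : List (String × Int)) (dictionary2 : List (String × Int)) : Decidable (Pre_new_dict_without_identical_keys dictionary1 dictionary2) := by unfold Pre_new_dict_without_identical_keys; infer_instance
def pvWitness_new_dict_without_identical_keys : (List (String × Int)) × (List (String × Int)) :=
  ([("a", 1), ("b", 2)], [("a", 1), ("c", 3)])

def Spec_new_dict_without_identical_keys (dictionary1 : List (String × Int)) (dictionary2 : List (String × Int)) (out : List (String × Int)) : Prop := out = new_dict_without_identical_keys_alt dictionary1 dictionary2
instance (dictionary1 : List (String × Int)) (dictionary2 : List (String × Int)) (out : List (String × Int)) : Decidable (Spec_new_dict_without_identical_keys dictionary1 dictionary2 out) := by unfold Spec_new_dict_without_identical_keys; infer_instance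

-- ===== CLAIM (what is proved, stated in full; the proofs are below) =====
def Claim_equal_new_dict_without_identical_keys : Prop := ∀ (dictionary1 : List (String × Int)) (dictionary2 : List (String × Int)), Dom_new_dict_without_identical_keys dictionary1 dictionary2 → Pre_new_dict_without_identical_keys dictionary1 dictionary2 → Spec_new_dict_without_identical_keys dictionary1 dictionary2 (new_dict_without_identical_keys dictionary1 dictionary2)

-- ===== LEMMAS AND PROOFS =====

-- the first loop of A: appending under a test is a filter-then-map of the keys
theorem temp_eq (l : List (String × Int)) (f : String × Int → Bool) (init : List String) :
    l.foldl (fun t p => if f p then t ++ [p.1] else t) init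
      = init ++ (l.filter f).map Prod.fst := by
  induction l generalizing init with
  | nil => simp
  | cons q l ih =>
    simp only [List.foldl_cons, List.filter_cons]
    by_cases h : f q = true
    · simp [h, ih]
    · simp [h, ih]

-- the second loop of A: folding erase over a key list filters the items once
theorem erase_foldl (ks : List String) (D : PySem.Dict String Int) :
    (ks.foldl (fun d k => d.erase k) D).items
      = D.items.filter (fun p => ks.all (fun k => !(p.1 == k))) := by
  induction ks generalizing D with
  | nil => simp
  | cons k ks ih =>
    rw [List.foldl_cons, ih]
    show ((D.erase k).items).filter _ = _
    simp only [PySem.Dict.erase, List.filter_filter]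
    apply List.filter_congr
    intro p _
    simp [Bool.and_comm]

theorem get?_mk_of_mem (d : List (String × Int)) (p : String × Int)
    (hmem : p ∈ d) (hnd : (d.map Prod.fst).Nodup) :
    (PySem.Dict.mk d).get? p.1 = some p.2 := by
  apply PySem.Dict.get?_of_mem_items (v := p.2)
  · simpa using hmem
  · simpa [PySem.Dict.keys] using hnd

-- ===== VERDICT (by name: the statement is the Claim_ definition above) =====
theorem new_dict_without_identical_keys_spec : Claim_equal_new_dict_without_identical_keys := by
  intro d1 d2 _ hpre
  unfold Spec_new_dict_without_identical_keys
  simp only [new_dict_without_identical_keys, new_dict_without_identical_keys_alt]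
  rw [temp_eq, erase_foldl]
  show d1.filter _ = d1.filter _
  apply List.filter_congr
  intro p hp
  have hget1 : (PySem.Dict.mk d1).get? p.1 = some p.2 := get?_mk_of_mem d1 p hp hpre
  rw [Bool.eq_iff_iff]
  simp only [List.nil_append, List.all_eq_true, List.mem_map, List.mem_filter,
    Bool.not_eq_true', beq_eq_false_iff_ne, Bool.and_eq_true, beq_iff_eq, ne_eq]
  rcases h2 : (PySem.Dict.mk d2).get? p.1 with _ | w
  · constructor
    · intro _; simp
    · rintro _ k ⟨q, ⟨hq, hcont, hval⟩, rfl⟩ hkp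
      rw [← hkp, PySem.Dict.contains_eq_isSome_get?, h2] at hcont
      simp at hcont
  · constructor
    · intro hall
      have hcont : (PySem.Dict.mk d2).contains p.1 = true := by
        rw [PySem.Dict.contains_eq_isSome_get?, h2]; rfl
      intro hw
      exact hall p.1 ⟨p, ⟨hp, hcont, by rw [hget1, h2, hw]⟩, rfl⟩ rfl
    · rintro hne k ⟨q, ⟨hq, hcont, hval⟩, rfl⟩ hkp
      rw [← hkp, hget1, h2] at hval
      exact hne (congrArg some (Option.some.inj hval).symm)
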